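-- pv_equiv track=rewrite | github.com/iamlkn/FPT-Project---Data-Profilling-Tool | dataprofiler/dataprofiler.py | isMonocity
-- ===== SOURCE A (Python) =====
-- def isMonocity(data):
--     inc = all(data[i] <= data[i+1] for i in range(len(data)-1))
--     dec = all(data[i] >= data[i+1] for i in range(len(data)-1))
--     if inc:
--         return 'Increasing'
--     elif dec:
--         return 'Decreasing'
--     else:
--         return 'None'
-- ===== SOURCE B (Python) =====
-- def isMonocity(data):
--     s = sorted(data)
--     if data == s:
--         return 'Increasing'
--     if data == sorted(data, reverse=True):
--         return 'Decreasing'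
--     return 'None'
-- ===== Notes on version B (the rewrite author's own statement) =====
-- stated objective: idiomatic
-- what changed: B classifies monotonicity by comparing the list with its sorted and reverse-sorted copies instead of running two adjacent-pair index scans.
import Mathlib
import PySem

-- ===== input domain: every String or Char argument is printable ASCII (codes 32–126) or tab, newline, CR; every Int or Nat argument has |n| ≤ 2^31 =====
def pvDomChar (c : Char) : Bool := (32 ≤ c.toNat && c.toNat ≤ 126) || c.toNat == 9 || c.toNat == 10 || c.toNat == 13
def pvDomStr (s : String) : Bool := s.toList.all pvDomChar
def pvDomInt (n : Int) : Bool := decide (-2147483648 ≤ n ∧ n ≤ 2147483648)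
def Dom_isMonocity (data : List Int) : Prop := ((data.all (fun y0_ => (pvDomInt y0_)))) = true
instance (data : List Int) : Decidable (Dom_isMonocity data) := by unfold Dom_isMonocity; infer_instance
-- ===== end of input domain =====

-- B compares the list with its sorted / reverse-sorted copy instead of two adjacent-pair scans (idiomatic rewrite).
-- ===== PORT A =====
-- indices 0..len-2 are always in range, so pyGetD's default 0 is never used and the port is exact
def isMonocity (data : List Int) : String :=
  let inc := (PySem.List.pyRange 0 ((data.length : Int) - 1) 1).all
      (fun i => decide (PySem.List.pyGetD data i 0 ≤ PySem.List.pyGetD data (i + 1) 0))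
  let dec := (PySem.List.pyRange 0 ((data.length : Int) - 1) 1).all
      (fun i => decide (PySem.List.pyGetD data i 0 ≥ PySem.List.pyGetD data (i + 1) 0))
  if inc then "Increasing"
  else if dec then "Decreasing"
  else "None"

-- ===== PORT B =====
def isMonocity_alt (data : List Int) : String :=
  let s := PySem.List.sorted data (fun x => x) false
  if data = s then "Increasing"
  else if data = PySem.List.sorted data (fun x => x) true then "Decreasing"
  else "None"

-- ===== PRECONDITION & SPEC =====
def Spec_isMonocity (data : List Int) (out : String) : Prop := out = isMonocity_alt data
instance (data : List Int) (out : String) : Decidable (Spec_isMonocity data out) := by unfold Spec_isMonocity; infer_instance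

-- ===== CLAIM (what is proved, stated in full; the proofs are below) =====
def Claim_equal_isMonocity : Prop := ∀ (data : List Int), Dom_isMonocity data → Spec_isMonocity data (isMonocity data)

-- ===== LEMMAS AND PROOFS =====

-- A's adjacent-pair scan over range(len-1) is exactly an IsChain of the comparison
theorem adj_all_iff_chain (data : List Int) (p : Int → Int → Bool) :
    ((PySem.List.pyRange 0 ((data.length : Int) - 1) 1).all
      (fun i => p (PySem.List.pyGetD data i 0) (PySem.List.pyGetD data (i + 1) 0)) = true)
    ↔ List.IsChain (fun a b => p a b = true) data := by
  rw [List.all_eq_true, List.isChain_iff_getElem]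
  constructor
  · intro h i hi
    have hm : ((i : Int)) ∈ PySem.List.pyRange 0 ((data.length : Int) - 1) 1 := by
      rw [PySem.List.mem_pyRange_one]; omega
    have hp := h _ hm
    have e1 : PySem.List.pyGetD data ((i : Int)) 0 = data[i] := by
      rw [PySem.List.pyGetD_natCast]; exact List.getD_eq_getElem _ _ (by omega)
    have e2 : PySem.List.pyGetD data ((i : Int) + 1) 0 = data[i + 1] := by
      rw [show ((i : Int) + 1) = (((i + 1 : Nat)) : Int) by push_cast; ring,
          PySem.List.pyGetD_natCast]
      exact List.getD_eq_getElem _ _ (by omega)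
    rw [e1, e2] at hp
    exact hp
  · intro h i hm
    rw [PySem.List.mem_pyRange_one] at hm
    have hi : i.toNat + 1 < data.length := by omega
    have hik : i = ((i.toNat : Nat) : Int) := by omega
    rw [hik]
    have e1 : PySem.List.pyGetD data ((i.toNat : Nat) : Int) 0 = data[i.toNat] := by
      rw [PySem.List.pyGetD_natCast]; exact List.getD_eq_getElem _ _ (by omega)
    have e2 : PySem.List.pyGetD data (((i.toNat : Nat) : Int) + 1) 0 = data[i.toNat + 1] := by
      rw [show (((i.toNat : Nat) : Int) + 1) = (((i.toNat + 1 : Nat)) : Int) by push_cast; ring,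
          PySem.List.pyGetD_natCast]
      exact List.getD_eq_getElem _ _ (by omega)
    rw [e1, e2]
    exact h i.toNat hi

theorem chain_le_iff_sorted (data : List Int) :
    List.IsChain (fun a b : Int => a ≤ b) data ↔ data = PySem.List.sorted data (fun x => x) false := by
  rw [@List.isChain_iff_pairwise _ (fun a b : Int => a ≤ b) data ⟨fun h1 h2 => le_trans h1 h2⟩]
  constructor
  · intro h; exact (PySem.List.sorted_eq_self_of_pairwise data (fun x => x) h).symm
  · intro h; rw [h]; exact PySem.List.sorted_pairwise data (fun x => x)

theorem chain_ge_iff_sorted_rev (data : List Int) :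
    List.IsChain (fun a b : Int => b ≤ a) data ↔ data = PySem.List.sorted data (fun x => x) true := by
  rw [@List.isChain_iff_pairwise _ (fun a b : Int => b ≤ a) data ⟨fun h1 h2 => le_trans h2 h1⟩]
  constructor
  · intro h; exact (PySem.List.sorted_rev_eq_self_of_pairwise data (fun x => x) h).symm
  · intro h; rw [h]; exact PySem.List.sorted_pairwise_rev data (fun x => x)

-- ===== VERDICT (by name: the statement is the Claim_ definition above) =====
theorem isMonocity_spec : Claim_equal_isMonocity := by
  intro data _
  unfold Spec_isMonocity isMonocity isMonocity_alt
  have hinc : ((PySem.List.pyRange 0 ((data.length : Int) - 1) 1).all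
      (fun i => decide (PySem.List.pyGetD data i 0 ≤ PySem.List.pyGetD data (i + 1) 0)) = true)
      ↔ data = PySem.List.sorted data (fun x => x) false := by
    refine (adj_all_iff_chain data (fun a b => decide (a ≤ b))).trans ?_
    refine Iff.trans ?_ (chain_le_iff_sorted data)
    exact List.IsChain.iff (fun a b => by simp)
  have hdec : ((PySem.List.pyRange 0 ((data.length : Int) - 1) 1).all
      (fun i => decide (PySem.List.pyGetD data i 0 ≥ PySem.List.pyGetD data (i + 1) 0)) = true)
      ↔ data = PySem.List.sorted data (fun x => x) true := by
    refine (adj_all_iff_chain data (fun a b => decide (a ≥ b))).trans ?_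
    refine Iff.trans ?_ (chain_ge_iff_sorted_rev data)
    exact List.IsChain.iff (fun a b => by simp [ge_iff_le])
  dsimp only
  by_cases hA : data = PySem.List.sorted data (fun x => x) false
  · rw [if_pos (hinc.mpr hA), if_pos hA]
  · rw [if_neg (fun h => hA (hinc.mp h)), if_neg hA]
    by_cases hB : data = PySem.List.sorted data (fun x => x) true
    · rw [if_pos (hdec.mpr hB), if_pos hB]
    · rw [if_neg (fun h => hB (hdec.mp h)), if_neg hB]
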